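-- pv_equiv track=rewrite | github.com/borgdev/anant | multi_modal_analysis/core/cross_modal_analyzer.py | _get_entities_in_modalities
-- ===== SOURCE A (Python) =====
-- from typing import Dict, List, Optional, Set, Any, Tuple
--
-- def _get_entities_in_modalities(
--
--     entity_index: Dict[str, Set[str]],
--     modalities: List[str]
-- ) -> Set[str]:
--     """Get entities that appear in all specified modalities."""
--     entities = set()
--     for entity, entity_mods in entity_index.items():
--         if all(mod in entity_mods for mod in modalities):
--             entities.add(entity)
--     return entities
-- ===== SOURCE B (Python) =====
-- from typing import Dict, List, Set
--
-- def _get_entities_in_modalities(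
--     entity_index: Dict[str, Set[str]],
--     modalities: List[str]
-- ) -> Set[str]:
--     """Get entities that appear in all specified modalities (inverse-index version)."""
--     if not modalities:
--         return set(entity_index.keys())
--     # one pass: modality -> set of entities that have it
--     index: Dict[str, Set[str]] = {}
--     for entity, entity_mods in entity_index.items():
--         for mod in entity_mods:
--             index.setdefault(mod, set()).add(entity)
--     result = index.get(modalities[0], set())
--     for mod in modalities[1:]:
--         result = result & index.get(mod, set())
--     return result
-- ===== Notes on version B (the rewrite author's own statement) =====
-- stated objective: alternative
-- what changed: Instead of scanning every entity and testing all modalities against its membership set, B builds an inverse index (modality -> set of entities) in one pass and returns the intersection of the indexed sets for the queried modalities (all keys when no modality is queried).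
import Mathlib
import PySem

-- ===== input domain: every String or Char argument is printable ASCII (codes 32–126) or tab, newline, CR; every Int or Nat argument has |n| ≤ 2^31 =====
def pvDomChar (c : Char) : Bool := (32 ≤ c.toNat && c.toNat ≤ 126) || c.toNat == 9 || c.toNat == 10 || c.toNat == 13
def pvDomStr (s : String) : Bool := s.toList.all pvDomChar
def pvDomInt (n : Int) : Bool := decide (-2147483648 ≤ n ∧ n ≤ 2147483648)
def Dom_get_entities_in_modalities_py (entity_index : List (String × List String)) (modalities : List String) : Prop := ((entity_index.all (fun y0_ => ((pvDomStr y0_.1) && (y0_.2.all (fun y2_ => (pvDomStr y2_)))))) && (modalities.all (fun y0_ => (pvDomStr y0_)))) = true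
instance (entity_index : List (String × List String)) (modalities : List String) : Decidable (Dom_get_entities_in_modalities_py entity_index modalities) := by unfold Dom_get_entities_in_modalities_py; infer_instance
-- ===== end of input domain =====

-- B replaces A's per-entity scan with an inverse index (modality -> entities) intersected over the queried modalities; objective: alternative decomposition.

-- ===== PORT A =====
-- entities = set(); for entity, entity_mods in entity_index.items(): if all(mod in entity_mods for mod in modalities): entities.add(entity)
def get_entities_in_modalities_py (entity_index : List (String × List String)) (modalities : List String) : List String :=
  ((PySem.Dict.ofList entity_index).items).foldl
    (fun entities p =>
      if modalities.all (fun mod => p.2.contains mod) then PySem.Set.add entities p.1 else entities)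
    ([] : PySem.Set String)

-- ===== PORT B =====
-- index.setdefault(mod, set()).add(entity) over all memberships, one pass
def pvBuildIndex (entity_index : List (String × List String)) : PySem.Dict String (PySem.Set String) :=
  ((PySem.Dict.ofList entity_index).items).foldl
    (fun index p =>
      p.2.foldl (fun index mod => index.modify mod [] (fun s => PySem.Set.add s p.1)) index)
    PySem.Dict.empty

def get_entities_in_modalities_py_alt (entity_index : List (String × List String)) (modalities : List String) : List String :=
  match modalities with
  | [] => (PySem.Dict.ofList entity_index).keys
  | m0 :: rest =>
    let index := pvBuildIndex entity_index
    rest.foldl (fun r mod => PySem.Set.inter r (index.getD mod [])) (index.getD m0 [])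

-- ===== PRECONDITION & SPEC =====
def Spec_get_entities_in_modalities_py (entity_index : List (String × List String)) (modalities : List String) (out : List String) : Prop := out = get_entities_in_modalities_py_alt entity_index modalities
instance (entity_index : List (String × List String)) (modalities : List String) (out : List String) : Decidable (Spec_get_entities_in_modalities_py entity_index modalities out) := by unfold Spec_get_entities_in_modalities_py; infer_instance

-- ===== CLAIM (what is proved, stated in full; the proofs are below) =====
def Claim_equal_get_entities_in_modalities_py : Prop := ∀ (entity_index : List (String × List String)) (modalities : List String), Dom_get_entities_in_modalities_py entity_index modalities → Spec_get_entities_in_modalities_py entity_index modalities (get_entities_in_modalities_py entity_index modalities)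

-- ===== LEMMAS AND PROOFS =====

-- A's loop, characterised: with distinct keys it appends exactly the filtered keys.
lemma pv_foldA (mods : List String) (L : List (String × List String)) (acc : List String)
    (hnd : (L.map Prod.fst).Nodup) (hdis : ∀ p ∈ L, acc.contains p.1 = false) :
    L.foldl (fun es p => if mods.all (fun mod => p.2.contains mod) then PySem.Set.add es p.1 else es) acc
      = acc ++ (L.filter (fun p => mods.all (fun mod => p.2.contains mod))).map Prod.fst := by
  induction L generalizing acc with
  | nil => simp
  | cons p L ih =>
    simp only [List.map_cons, List.nodup_cons] at hnd
    have hp : acc.contains p.1 = false := hdis p (by simp)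
    have hdisL : ∀ r ∈ L, acc.contains r.1 = false := fun r hr => hdis r (by simp [hr])
    rw [List.foldl_cons, List.filter_cons]
    by_cases hq : mods.all (fun mod => p.2.contains mod) = true
    · rw [if_pos hq, if_pos hq]
      have hp' : p.1 ∉ acc := by simpa using hp
      have hadd : PySem.Set.add acc p.1 = acc ++ [p.1] := by
        simp [PySem.Set.add, hp']
      have hdis' : ∀ r ∈ L, (acc ++ [p.1]).contains r.1 = false := by
        intro r hr
        have h2 : p.1 ≠ r.1 := fun h => hnd.1 (h ▸ List.mem_map_of_mem hr)
        have h1 := hdisL r hr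
        simp only [List.contains_eq_mem, decide_eq_false_iff_not, List.mem_append,
          List.mem_singleton] at h1 ⊢
        rintro (h | h)
        · exact h1 h
        · exact h2 h.symm
      rw [hadd, ih (acc ++ [p.1]) hnd.2 hdis']
      simp
    · rw [if_neg hq, if_neg hq, ih acc hnd.2 hdisL]

-- inner loop of the index builder
lemma pv_getD_inner (ms : List String) (d : PySem.Dict String (PySem.Set String)) (x m : String) :
    (ms.foldl (fun d mod => d.modify mod [] (fun s => PySem.Set.add s x)) d).getD m []
      = if ms.contains m then PySem.Set.add (d.getD m []) x else d.getD m [] := by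
  induction ms generalizing d with
  | nil => simp
  | cons m' ms ih =>
    simp only [List.foldl_cons]
    rw [ih]
    by_cases hm : m = m'
    · subst hm
      rw [PySem.Dict.getD_modify_self]
      simp
    · rw [PySem.Dict.getD_modify]
      simp [hm]

-- outer loop of the index builder: the entry of modality m lists exactly the keys whose set contains m
lemma pv_getD_build (L : List (String × List String)) (d : PySem.Dict String (PySem.Set String)) (m : String)
    (hnd : (L.map Prod.fst).Nodup) (hdis : ∀ p ∈ L, (d.getD m []).contains p.1 = false) :
    ((L.foldl (fun index p =>
        p.2.foldl (fun index mod => index.modify mod [] (fun s => PySem.Set.add s p.1)) index) d).getD m [])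
      = d.getD m [] ++ (L.filter (fun p => p.2.contains m)).map Prod.fst := by
  induction L generalizing d with
  | nil => simp
  | cons p L ih =>
    simp only [List.map_cons, List.nodup_cons] at hnd
    simp only [List.foldl_cons, List.filter_cons]
    set d1 := p.2.foldl (fun index mod => index.modify mod [] (fun s => PySem.Set.add s p.1)) d with hd1
    have hpd : p.1 ∉ d.getD m [] := by simpa using hdis p (by simp)
    have hval : d1.getD m [] = if p.2.contains m then d.getD m [] ++ [p.1] else d.getD m [] := by
      rw [hd1, pv_getD_inner]
      by_cases hc : m ∈ p.2
      · simp [hc, PySem.Set.add, hpd]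
      · simp [hc]
    have hdis' : ∀ r ∈ L, (d1.getD m []).contains r.1 = false := by
      intro r hr
      have h1 : r.1 ∉ d.getD m [] := by simpa using hdis r (by simp [hr])
      have h2 : p.1 ≠ r.1 := fun h => hnd.1 (h ▸ List.mem_map_of_mem hr)
      rw [hval]
      by_cases hc : m ∈ p.2 <;> simp [hc, h1, Ne.symm h2]
    rw [ih d1 hnd.2 hdis', hval]
    by_cases hc : m ∈ p.2 <;> simp [hc]

lemma pv_index_getD (entity_index : List (String × List String)) (m : String) :
    (pvBuildIndex entity_index).getD m []
      = (((PySem.Dict.ofList entity_index).items).filter (fun p => p.2.contains m)).map Prod.fst := by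
  have hnd : (((PySem.Dict.ofList entity_index).items).map Prod.fst).Nodup :=
    PySem.Dict.nodup_keys_ofList entity_index
  have := pv_getD_build ((PySem.Dict.ofList entity_index).items) PySem.Dict.empty m hnd
    (by intro p _; simp [PySem.Dict.getD_empty])
  simpa [pvBuildIndex, PySem.Dict.getD_empty] using this

-- with distinct keys, membership of p.1 in the filtered key list is the filter test itself
lemma pv_mem_filter_keys (L : List (String × List String)) (p : String × List String)
    (hnd : (L.map Prod.fst).Nodup) (hp : p ∈ L) (g : String × List String → Bool) :
    ((L.filter g).map Prod.fst).contains p.1 = g p := by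
  by_cases hg : g p = true
  · simp only [hg, List.contains_eq_mem, decide_eq_true_eq]
    exact List.mem_map_of_mem (List.mem_filter.mpr ⟨hp, hg⟩)
  · have hno : ¬ ∃ a ∈ L.filter g, a.1 = p.1 := by
      rintro ⟨q, hq, hfst⟩
      have hqL := (List.mem_filter.mp hq).1
      have heq : q = p := List.inj_on_of_nodup_map hnd hqL hp hfst
      exact hg (heq ▸ (List.mem_filter.mp hq).2)
    simp only [List.contains_eq_mem, List.mem_map, hno, decide_false]
    exact (Bool.eq_false_iff.mpr hg).symm
    
-- the intersection loop
lemma pv_foldInter (ms : List String) (L : List (String × List String))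
    (hnd : (L.map Prod.fst).Nodup) (P : String × List String → Bool) :
    ms.foldl (fun r mod => PySem.Set.inter r ((L.filter (fun p => p.2.contains mod)).map Prod.fst))
        ((L.filter P).map Prod.fst)
      = (L.filter (fun p => P p && ms.all (fun mod => p.2.contains mod))).map Prod.fst := by
  induction ms generalizing P with
  | nil => simp
  | cons m ms ih =>
    simp only [List.foldl_cons]
    have hstep : PySem.Set.inter ((L.filter P).map Prod.fst)
          ((L.filter (fun p => p.2.contains m)).map Prod.fst)
        = (L.filter (fun p => P p && p.2.contains m)).map Prod.fst := by
      simp only [PySem.Set.inter, PySem.Set.contains, List.filter_map, Function.comp_def,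
        List.filter_filter]
      congr 1
      apply List.filter_congr
      intro p hp
      rw [pv_mem_filter_keys L p hnd hp, Bool.and_comm]
    rw [hstep, ih]
    congr 1
    apply List.filter_congr
    intro p _
    simp [Bool.and_assoc]

-- ===== VERDICT (by name: the statement is the Claim_ definition above) =====
theorem get_entities_in_modalities_py_spec : Claim_equal_get_entities_in_modalities_py := by
  intro entity_index modalities _
  unfold Spec_get_entities_in_modalities_py get_entities_in_modalities_py get_entities_in_modalities_py_alt
  have hnd : (((PySem.Dict.ofList entity_index).items).map Prod.fst).Nodup :=
    PySem.Dict.nodup_keys_ofList entity_index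
  rw [pv_foldA modalities _ [] hnd (by intro p _; simp)]
  cases modalities with
  | nil => simp [PySem.Dict.keys]
  | cons m0 rest =>
    have hcongr : rest.foldl (fun r mod => PySem.Set.inter r ((pvBuildIndex entity_index).getD mod [])) ((pvBuildIndex entity_index).getD m0 [])
        = rest.foldl (fun r mod => PySem.Set.inter r ((((PySem.Dict.ofList entity_index).items).filter (fun p => p.2.contains mod)).map Prod.fst)) ((((PySem.Dict.ofList entity_index).items).filter (fun p => p.2.contains m0)).map Prod.fst) := by
      rw [pv_index_getD]
      exact PySem.List.foldl_congr_mem _ _ _ _ (by intro r mod _; rw [pv_index_getD])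
    simp only [hcongr, pv_foldInter rest _ hnd]
    simp
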